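-- pv_equiv track=rewrite | github.com/robertmuth/Cwerg | CpuA64/opcode_tab.py | ExtractBits
-- ===== SOURCE A (Python) =====
-- def ExtractBits(data, mask) -> int:
--     out = 0
--     pos = 1
--     # print ("@@ %x %x" % (data, mask))
--     while mask:
--         new_mask = mask & (mask - 1)
--         bit = mask ^ new_mask
--         if bit & data:
--             out |= pos
--         pos <<= 1
--         mask = new_mask
--     # print ("@@ %x" % out)
--     return out
-- ===== SOURCE B (Python) =====
-- def ExtractBits(data, mask):
--     out = 0
--     pos = 0
--     while mask:
--         if mask & 1:
--             if data & 1: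
--                 out |= 1 << pos
--             pos += 1
--         data >>= 1
--         mask >>= 1
--     return out
-- ===== Notes on version B (the rewrite author's own statement) =====
-- stated objective: alternative
-- what changed: B scans bit positions one at a time, shifting data and mask right and advancing an output bit counter only on set mask bits, instead of A's Kernighan-style jumps between set bits via mask & (mask-1) with a doubling position accumulator.
import Mathlib
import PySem

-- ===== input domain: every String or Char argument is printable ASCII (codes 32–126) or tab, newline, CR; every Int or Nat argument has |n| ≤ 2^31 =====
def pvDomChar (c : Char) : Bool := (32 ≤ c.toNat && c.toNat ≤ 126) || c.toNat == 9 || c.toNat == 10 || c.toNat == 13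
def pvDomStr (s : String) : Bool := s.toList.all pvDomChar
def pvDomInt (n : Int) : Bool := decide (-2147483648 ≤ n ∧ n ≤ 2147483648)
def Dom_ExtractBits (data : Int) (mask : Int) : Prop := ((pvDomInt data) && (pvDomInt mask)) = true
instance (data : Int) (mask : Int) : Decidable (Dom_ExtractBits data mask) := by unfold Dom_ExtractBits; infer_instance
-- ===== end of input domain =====

-- B replaces A's Kernighan-style jump between set mask bits (mask & (mask-1), doubling
-- position accumulator) by a plain bit-by-bit scan shifting data and mask right, advancing
-- the output position only on set mask bits; same return value on every mask ≥ 0.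


-- termination helper for port A: clearing the lowest set bit shrinks a positive mask
theorem pv_band_pred_toNat_lt {mask : Int} (h : 0 < mask) :
    (PySem.Int.band mask (mask - 1)).toNat < mask.toNat := by
  rw [PySem.Int.band_of_nonneg (by omega) (by omega)]
  have : mask.toNat &&& (mask - 1).toNat ≤ (mask - 1).toNat := Nat.and_le_right
  omega

-- termination helper for port B: a right shift shrinks a positive mask
theorem pv_shiftRight_one_toNat_lt {mask : Int} (h : 0 < mask) :
    (mask >>> (1 : Nat)).toNat < mask.toNat := by
  rw [Int.shiftRight_eq_div_pow]
  have : mask / (2 : Int) < mask := by omega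
  simp only [pow_one]
  omega

-- ===== PORT A =====
-- Python's `while mask:` exits exactly when mask == 0 and never terminates for mask < 0
-- (excluded by Pre_); the guard `0 < mask` makes the Lean function total.
def ExtractBitsLoop (data : Int) (out : Int) (pos : Int) (mask : Int) : Int :=
  if h : 0 < mask then
    let new_mask := PySem.Int.band mask (mask - 1)
    let bit := PySem.Int.bxor mask new_mask
    let out' := if PySem.Int.band bit data ≠ 0 then PySem.Int.bor out pos else out
    ExtractBitsLoop data out' (pos <<< (1 : Nat)) new_mask
  else out
termination_by mask.toNat
decreasing_by exact pv_band_pred_toNat_lt h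

def ExtractBits (data : Int) (mask : Int) : Int :=
  ExtractBitsLoop data 0 1 mask

-- ===== PORT B =====
-- pos is Python's nonnegative shift counter, hence Nat.
def ExtractBitsAltLoop (data : Int) (mask : Int) (out : Int) (pos : Nat) : Int :=
  if h : 0 < mask then
    if PySem.Int.band mask 1 ≠ 0 then
      let out' := if PySem.Int.band data 1 ≠ 0 then PySem.Int.bor out ((1 : Int) <<< pos) else out
      ExtractBitsAltLoop (data >>> (1 : Nat)) (mask >>> (1 : Nat)) out' (pos + 1)
    else
      ExtractBitsAltLoop (data >>> (1 : Nat)) (mask >>> (1 : Nat)) out pos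
  else out
termination_by mask.toNat
decreasing_by all_goals exact pv_shiftRight_one_toNat_lt h

def ExtractBits_alt (data : Int) (mask : Int) : Int :=
  ExtractBitsAltLoop data mask 0 0

-- ===== PRECONDITION & SPEC =====
-- Pre_ excludes mask < 0, on which the Python `while mask:` loop of BOTH A and B never returns.
def Pre_ExtractBits (data : Int) (mask : Int) : Prop := 0 ≤ mask
instance (data : Int) (mask : Int) : Decidable (Pre_ExtractBits data mask) := by unfold Pre_ExtractBits; infer_instance
def pvWitness_ExtractBits : Int × Int := (13, 11)
def Spec_ExtractBits (data : Int) (mask : Int) (out : Int) : Prop := out = ExtractBits_alt data mask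
instance (data : Int) (mask : Int) (out : Int) : Decidable (Spec_ExtractBits data mask out) := by unfold Spec_ExtractBits; infer_instance

-- ===== CLAIM (what is proved, stated in full; the proofs are below) =====
def Claim_equal_ExtractBits : Prop := ∀ (data : Int) (mask : Int), Dom_ExtractBits data mask → Pre_ExtractBits data mask → Spec_ExtractBits data mask (ExtractBits data mask)

-- ===== LEMMAS AND PROOFS =====

-- Nat-level "bit doubling" facts, from Mathlib's Nat.bit lemmas
theorem pv_nat_and (x y : Bool) (a b : Nat) :
    ((2*a + x.toNat) &&& (2*b + y.toNat)) = 2*(a &&& b) + (x && y).toNat := by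
  have := Nat.land_bit x a y b
  simpa [Nat.bit_val] using this

theorem pv_nat_xor (x y : Bool) (a b : Nat) :
    ((2*a + x.toNat) ^^^ (2*b + y.toNat)) = 2*(a ^^^ b) + (x != y).toNat := by
  have := Nat.xor_bit x a y b
  simpa [Nat.bit_val] using this

-- Int-level doubling: Python & on 2a+x and 2b+y (a nonneg, b arbitrary — data may be negative)
theorem pv_band_dd (x y : Bool) (a b : Int) (ha : 0 ≤ a) :
    PySem.Int.band (2*a + x.toNat) (2*b + y.toNat) = 2 * PySem.Int.band a b + (x && y).toNat := by
  rcases le_or_gt 0 b with hb | hb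
  · rw [PySem.Int.band_of_nonneg (by positivity) (by positivity),
        PySem.Int.band_of_nonneg ha hb]
    have h1 : (2*a + (x.toNat : Int)).toNat = 2*a.toNat + x.toNat := by omega
    have h2 : (2*b + (y.toNat : Int)).toNat = 2*b.toNat + y.toNat := by omega
    rw [h1, h2, pv_nat_and]
    push_cast; omega
  · rw [PySem.Int.band.eq_1, PySem.Int.band.eq_1]
    rw [if_pos (by positivity), if_neg (by cases y <;> simp <;> omega), if_pos ha, if_neg (by omega)]
    have h1 : (2*a + (x.toNat : Int)).toNat = 2*a.toNat + x.toNat := by omega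
    have h3 : (-(2*b + (y.toNat : Int)) - 1).toNat = 2*(-b-1).toNat + (!y).toNat := by
      cases y <;> simp <;> omega
    rw [h1, h3, pv_nat_and]
    have hle : a.toNat &&& (-b-1).toNat ≤ a.toNat := Nat.and_le_left
    have hle2 : (2*a.toNat + x.toNat) &&& (2*(-b-1).toNat + (!y).toNat) ≤ 2*a.toNat + x.toNat :=
      Nat.and_le_left
    cases x <;> cases y <;> simp_all <;> push_cast <;> omega

theorem pv_bxor_dd (x y : Bool) (a b : Int) (ha : 0 ≤ a) (hb : 0 ≤ b) :
    PySem.Int.bxor (2*a + x.toNat) (2*b + y.toNat) = 2 * PySem.Int.bxor a b + (x != y).toNat := by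
  rw [PySem.Int.bxor_of_nonneg (by positivity) (by positivity), PySem.Int.bxor_of_nonneg ha hb]
  have h1 : (2*a + (x.toNat : Int)).toNat = 2*a.toNat + x.toNat := by omega
  have h2 : (2*b + (y.toNat : Int)).toNat = 2*b.toNat + y.toNat := by omega
  rw [h1, h2, pv_nat_xor]
  push_cast; omega

theorem pv_band_nonneg {a b : Int} (ha : 0 ≤ a) (hb : 0 ≤ b) : 0 ≤ PySem.Int.band a b := by
  rw [PySem.Int.band_of_nonneg ha hb]; positivity

theorem pv_bxor_nonneg {a b : Int} (ha : 0 ≤ a) (hb : 0 ≤ b) : 0 ≤ PySem.Int.bxor a b := by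
  rw [PySem.Int.bxor_of_nonneg ha hb]; positivity

theorem pv_decomp (m : Int) : ∃ (x : Bool), m = 2*(m >>> (1 : Nat)) + x.toNat := by
  refine ⟨decide (m % 2 = 1), ?_⟩
  rw [Int.shiftRight_eq_div_pow]
  rcases Int.emod_two_eq_zero_or_one m with h | h <;> simp [h] <;> omega

-- specialized rewrite forms used by the loop proofs
theorem pv_sr_even (a : Int) : (2*a) >>> (1 : Nat) = a := by
  rw [Int.shiftRight_eq_div_pow]; push_cast; omega

theorem pv_sr_odd (a : Int) : (2*a + 1) >>> (1 : Nat) = a := by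
  rw [Int.shiftRight_eq_div_pow]; push_cast; omega

theorem pv_band_even_pred (k : Int) (hk : 0 ≤ k) :
    PySem.Int.band (2*k) (2*k - 1) = 2 * PySem.Int.band k (k - 1) := by
  have h := pv_band_dd false true k (k - 1) hk
  simp only [Bool.toNat_false, Bool.toNat_true] at h
  push_cast at h
  rw [show 2*(k-1) + (1:Int) = 2*k - 1 from by ring] at h
  simpa using h

theorem pv_bxor_even_even (k m : Int) (hk : 0 ≤ k) (hm : 0 ≤ m) :
    PySem.Int.bxor (2*k) (2*m) = 2 * PySem.Int.bxor k m := by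
  have h := pv_bxor_dd false false k m hk hm
  push_cast at h
  simpa using h

theorem pv_band_even_left (b data : Int) (hb : 0 ≤ b) :
    PySem.Int.band (2*b) data = 2 * PySem.Int.band b (data >>> (1 : Nat)) := by
  obtain ⟨xd, hd⟩ := pv_decomp data
  have h := pv_band_dd false xd b (data >>> (1 : Nat)) hb
  rw [← hd] at h
  simpa using h

theorem pv_band_odd_pred (k : Int) (hk : 0 ≤ k) :
    PySem.Int.band (2*k + 1) (2*k + 1 - 1) = 2*k := by
  have h := pv_band_dd true false k k hk
  push_cast at h
  rw [show 2*k + (1:Int) - 1 = 2*k from by ring]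
  rw [show (2*k : Int) = 2*k + 0 from by ring]
  simpa [PySem.Int.band_self] using h

theorem pv_bxor_odd_even (k : Int) (hk : 0 ≤ k) :
    PySem.Int.bxor (2*k + 1) (2*k) = 1 := by
  have h := pv_bxor_dd true false k k hk hk
  push_cast at h
  simpa [PySem.Int.bxor_self] using h

theorem pv_band_one_left (data : Int) : PySem.Int.band 1 data = PySem.Int.mod data 2 := by
  rw [PySem.Int.band_comm, PySem.Int.band_one]

theorem pv_band_even_one (k : Int) : PySem.Int.band (2*k) 1 = 0 := by
  rw [PySem.Int.band_one, PySem.Int.mod_eq_emod_of_pos (by omega)]; omega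

theorem pv_band_odd_one (k : Int) : PySem.Int.band (2*k + 1) 1 = 1 := by
  rw [PySem.Int.band_one, PySem.Int.mod_eq_emod_of_pos (by omega)]; omega

theorem pv_two_mul_ne (x : Int) : (2*x ≠ 0) = (x ≠ 0) := by simp

-- A's loop on an even mask 2k behaves like on mask k with data shifted right once
theorem pv_loopA_even : ∀ (n : Nat) (k : Int), k.toNat ≤ n → 0 ≤ k → ∀ (data out pos : Int),
    ExtractBitsLoop data out pos (2*k) = ExtractBitsLoop (data >>> (1 : Nat)) out pos k := by
  intro n
  induction n with
  | zero =>
    intro k hn hk data out pos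
    have hzero : k = 0 := by omega
    subst hzero
    conv_lhs => rw [ExtractBitsLoop]
    conv_rhs => rw [ExtractBitsLoop]
    norm_num
  | succ n ih =>
    intro k hn hk data out pos
    rcases eq_or_lt_of_le hk with hk0 | hkpos
    · rw [← hk0]
      conv_lhs => rw [ExtractBitsLoop]
      conv_rhs => rw [ExtractBitsLoop]
      norm_num
    · have hnk0 : 0 ≤ PySem.Int.band k (k - 1) := pv_band_nonneg (le_of_lt hkpos) (by omega)
      have hnklt : (PySem.Int.band k (k - 1)).toNat < k.toNat := pv_band_pred_toNat_lt hkpos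
      conv_lhs => rw [ExtractBitsLoop]
      conv_rhs => rw [ExtractBitsLoop]
      rw [dif_pos (by omega : (0:Int) < 2*k), dif_pos hkpos]
      simp only [pv_band_even_pred k hk,
        pv_bxor_even_even k (PySem.Int.band k (k - 1)) hk hnk0,
        pv_band_even_left _ _ (pv_bxor_nonneg hk hnk0),
        pv_two_mul_ne]
      exact ih (PySem.Int.band k (k - 1)) (by omega) hnk0 data _ _

-- the two loops agree: A's position accumulator is 1 <<< (B's position counter)
theorem pv_loopAB : ∀ (n : Nat) (mask : Int), mask.toNat ≤ n → 0 ≤ mask →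
    ∀ (data out : Int) (p : Nat),
    ExtractBitsLoop data out ((1 : Int) <<< p) mask = ExtractBitsAltLoop data mask out p := by
  intro n
  induction n with
  | zero =>
    intro mask hn hm data out p
    have hzero : mask = 0 := by omega
    subst hzero
    conv_lhs => rw [ExtractBitsLoop]
    conv_rhs => rw [ExtractBitsAltLoop]
    norm_num
  | succ n ih =>
    intro mask hn hm data out p
    rcases eq_or_lt_of_le hm with hm0 | hmpos
    · rw [← hm0]
      conv_lhs => rw [ExtractBitsLoop]
      conv_rhs => rw [ExtractBitsAltLoop]
      norm_num
    · obtain ⟨xm, hmk⟩ := pv_decomp mask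
      have hklt : (mask >>> (1 : Nat)).toNat < mask.toNat := pv_shiftRight_one_toNat_lt hmpos
      cases xm with
      | false =>
        -- even mask: A is handled by pv_loopA_even; B skips the bit without advancing pos
        simp only [Bool.toNat_false] at hmk
        norm_num at hmk
        set k := mask >>> (1 : Nat) with hkdef
        have hkpos : 0 < k := by omega
        rw [hmk, pv_loopA_even n k (by omega) (by omega),
            ih k (by omega) (by omega)]
        conv_rhs =>
          rw [ExtractBitsAltLoop]
          rw [dif_pos (by omega : (0:Int) < 2*k)]
          rw [if_neg (by rw [pv_band_even_one]; simp)]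
          rw [pv_sr_even]
      | true =>
        -- odd mask 2k+1: A clears bit 0 (new_mask = 2k, bit = 1) and doubles pos;
        -- B consumes bit 0 of data and increments pos
        simp only [Bool.toNat_true] at hmk
        push_cast at hmk
        set k := mask >>> (1 : Nat) with hkdef
        have hk0 : 0 ≤ k := by omega
        rw [hmk]
        conv_lhs => rw [ExtractBitsLoop]
        rw [dif_pos (by omega : (0:Int) < 2*k + 1)]
        simp only [pv_band_odd_pred k hk0, pv_bxor_odd_even k hk0, pv_band_one_left]
        have hps : ((1 : Int) <<< p) <<< (1 : Nat) = (1 : Int) <<< (p + 1) := by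
          rw [Int.shiftLeft_eq, Int.shiftLeft_eq, Int.shiftLeft_eq]
          ring
        rw [hps, pv_loopA_even n k (by omega) hk0, ih k (by omega) hk0]
        conv_rhs =>
          rw [ExtractBitsAltLoop]
          rw [dif_pos (by omega : (0:Int) < 2*k + 1)]
          rw [if_pos (by rw [pv_band_odd_one]; simp : PySem.Int.band (2*k+1) 1 ≠ 0)]
          rw [pv_sr_odd, PySem.Int.band_one]

-- ===== VERDICT (by name: the statement is the Claim_ definition above) =====
theorem ExtractBits_spec : Claim_equal_ExtractBits := by
  intro data mask _ hpre
  unfold Spec_ExtractBits ExtractBits ExtractBits_alt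
  have h1 : (1 : Int) = (1 : Int) <<< (0 : Nat) := by rw [Int.shiftLeft_eq]; norm_num
  rw [h1]
  exact pv_loopAB mask.toNat mask le_rfl hpre data 0 0
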